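-- pv_equiv track=rewrite | github.com/MFatihErdemir/Automata | CFG/241213103_Muhammet_Fatih_Erdemir.py | kelimeleri_uret
-- ===== SOURCE A (Python) =====
-- def terminal_mi(sembol):
--     return sembol.islower() and len(sembol) == 1
--
-- def kelimeleri_uret(kurallar, baslangic_sembolu, max_derinlik=10):
--     tum_kelimeler = []
--     def genislet(mevcut, derinlik):
--         if derinlik > max_derinlik:
--             return
--
--         tum_terminal = all(terminal_mi(c) for c in mevcut)
--
--         if tum_terminal:
--             tum_kelimeler.append(mevcut)
--             return
--
--         ilk_non_terminal = None
--         konum = -1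
--         for i, c in enumerate(mevcut):
--             if not terminal_mi(c):
--                 ilk_non_terminal = c
--                 konum = i
--                 break
--
--         if ilk_non_terminal and ilk_non_terminal in kurallar:
--             for uretim in kurallar[ilk_non_terminal]:
--                 yeni_string = mevcut[:konum] + uretim + mevcut[konum + 1:]
--                 genislet(yeni_string, derinlik + 1)
--
--     genislet(baslangic_sembolu, 0)
--
--     kelime_sayilari = {}
--     for kelime in tum_kelimeler:
--         kelime_sayilari[kelime] = kelime_sayilari.get(kelime, 0) + 1
--
--     benzersiz_kelimeler = sorted(set(tum_kelimeler))
--     tekrarli_kelimeler = sorted([k for k, v in kelime_sayilari.items() if v > 1])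
--
--     return benzersiz_kelimeler, tekrarli_kelimeler, kelime_sayilari
-- ===== SOURCE B (Python) =====
-- def kelimeleri_uret(kurallar, baslangic_sembolu, max_derinlik=10):
--     kelimeler = []
--     yigin = [(baslangic_sembolu, 0)]
--     while yigin:
--         mevcut, derinlik = yigin.pop()
--         if derinlik > max_derinlik:
--             continue
--         konum = next((i for i, c in enumerate(mevcut) if not c.islower()), None)
--         if konum is None:
--             kelimeler.append(mevcut)
--             continue
--         uretimler = kurallar.get(mevcut[konum])
--         if uretimler is not None:
--             for uretim in reversed(uretimler):
--                 yigin.append((mevcut[:konum] + uretim + mevcut[konum + 1:], derinlik + 1))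
--     sayilar = {}
--     for k in kelimeler:
--         sayilar[k] = sayilar.get(k, 0) + 1
--     benzersiz = sorted(set(kelimeler))
--     tekrarli = sorted(k for k, v in sayilar.items() if v > 1)
--     return benzersiz, tekrarli, sayilar
-- ===== Notes on version B (the rewrite author's own statement) =====
-- stated objective: alternative
-- what changed: Replaces the recursive genislet closure (call stack + shared mutable word list) with an iterative worklist loop over an explicit stack of (string, depth) pairs, pushing productions in reverse so the depth-first order and word multiplicities are identical; post-processing is unchanged.
import Mathlib
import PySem

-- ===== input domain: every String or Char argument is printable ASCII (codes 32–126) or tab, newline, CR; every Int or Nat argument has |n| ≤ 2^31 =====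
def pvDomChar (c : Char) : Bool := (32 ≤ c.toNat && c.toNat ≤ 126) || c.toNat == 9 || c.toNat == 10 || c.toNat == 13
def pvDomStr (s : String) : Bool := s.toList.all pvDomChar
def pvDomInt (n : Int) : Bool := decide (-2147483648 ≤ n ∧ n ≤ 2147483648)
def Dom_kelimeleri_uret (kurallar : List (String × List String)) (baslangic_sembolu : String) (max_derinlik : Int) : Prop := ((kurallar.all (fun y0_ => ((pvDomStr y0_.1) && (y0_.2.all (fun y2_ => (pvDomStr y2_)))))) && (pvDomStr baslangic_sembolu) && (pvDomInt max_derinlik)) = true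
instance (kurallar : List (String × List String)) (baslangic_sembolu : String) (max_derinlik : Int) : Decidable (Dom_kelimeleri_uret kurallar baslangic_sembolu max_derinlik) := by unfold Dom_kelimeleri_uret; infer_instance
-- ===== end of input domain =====

-- B replaces A's recursive depth-first expansion by an explicit worklist stack (alternative
-- decomposition, same cost); the post-processing (sorted unique words, sorted repeats, counts)
-- is shared and identical in both.

-- ===== PORT A =====
-- terminal_mi(sembol): sembol.islower() and len(sembol) == 1.  It is only ever applied to the
-- single characters of a string, where len(sembol) == 1 is identically true and .islower() on a
-- one-character string is the per-character predicate (exact on the ASCII domain).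
def terminalMi (c : Char) : Bool := PySem.Chars.islower c

-- the 'for i, c in enumerate(mevcut): if not terminal_mi(c): break' scan (first non-terminal
-- with its position); shared by both ports (B's 'next((i for i, c in enumerate(...)), None)'
-- is the same scan)
def ilkNonTerminal : List Char → Nat → Option (Char × Nat)
  | [], _ => none
  | c :: rest, i => if terminalMi c then ilkNonTerminal rest (i + 1) else some (c, i)

-- mevcut[:konum] + uretim + mevcut[konum+1:]  (konum is a valid index, so take/drop is exact)
def yeniString (mevcut : List Char) (konum : Nat) (uretim : String) : List Char :=
  mevcut.take konum ++ uretim.toList ++ mevcut.drop (konum + 1)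

-- shared post-processing, identical lines in both Pythons: counts dict, sorted(set(words)),
-- sorted repeated words
def sonucHazirla (tum_kelimeler : List (List Char)) :
    List String × List String × (List (String × Int)) :=
  let kelimeler : List String := tum_kelimeler.map String.ofList
  let kelime_sayilari :=
    kelimeler.foldl (fun d k => d.insert k (d.getD k 0 + 1)) (PySem.Dict.empty (κ := String) (ν := Int))
  let benzersiz := PySem.List.sorted (PySem.Set.ofList kelimeler) (fun x => x) false
  let tekrarli := PySem.List.sorted
    ((kelime_sayilari.items.filter (fun p => decide (p.2 > 1))).map (·.1)) (fun x => x) false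
  (benzersiz, tekrarli, kelime_sayilari.items)

-- the recursive genislet of A, threading tum_kelimeler as an accumulator
def genisletA (kur : PySem.Dict String (List String)) (maxd : Int)
    (mevcut : List Char) (derinlik : Int) (acc : List (List Char)) : List (List Char) :=
  if derinlik > maxd then acc
  else if mevcut.all terminalMi then acc ++ [mevcut]
  else
    match ilkNonTerminal mevcut 0 with
    | none => acc
    | some (c, konum) =>
      match kur.get? (String.ofList [c]) with
      | none => acc
      | some uretimler =>
        uretimler.foldl
          (fun a u => genisletA kur maxd (yeniString mevcut konum u) (derinlik + 1) a) acc
termination_by (maxd + 1 - derinlik).toNat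
decreasing_by omega

def kelimeleri_uret (kurallar : List (String × List String)) (baslangic_sembolu : String)
    (max_derinlik : Int) : List String × List String × (List (String × Int)) :=
  sonucHazirla (genisletA (PySem.Dict.ofList kurallar) max_derinlik baslangic_sembolu.toList 0 [])

-- ===== PORT B =====
-- termination measure only (never part of the computed result): number of worklist pops a
-- subtree with the given remaining fuel can cause
def gBound (kur : PySem.Dict String (List String)) : Nat → List Char → Nat
  | 0, _ => 1
  | fuel + 1, m =>
    match ilkNonTerminal m 0 with
    | none => 1
    | some (c, konum) =>
      match kur.get? (String.ofList [c]) with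
      | none => 1
      | some uretimler => 1 + (uretimler.map (fun u => gBound kur fuel (yeniString m konum u))).sum

theorem one_le_gBound (kur : PySem.Dict String (List String)) (fuel : Nat) (m : List Char) :
    1 ≤ gBound kur fuel m := by
  cases fuel with
  | zero => simp [gBound]
  | succ f =>
    simp only [gBound]
    rcases h : ilkNonTerminal m 0 with _ | ⟨c, konum⟩ <;> simp
    rcases hg : kur.get? (String.ofList [c]) with _ | u <;> simp

-- pushing reversed(uretimler) one by one onto the stack top leaves them on top in
-- original order (cited by loopB's decreasing_by and by the proofs below)
theorem revPush {α β : Type} (f : α → β) (l : List α) (st : List β) :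
    l.reverse.foldl (fun s u => f u :: s) st = l.map f ++ st := by
  induction l generalizing st with
  | nil => rfl
  | cons a t ih => simp [List.foldl_append, ih]

-- the while-loop of B: pop (mevcut, derinlik) from the stack top, emit or expand
def loopB (kur : PySem.Dict String (List String)) (maxd : Int) :
    List (List Char × Int) → List (List Char) → List (List Char)
  | [], kelimeler => kelimeler
  | (mevcut, derinlik) :: yigin, kelimeler =>
    if derinlik > maxd then loopB kur maxd yigin kelimeler
    else
      match hNT : ilkNonTerminal mevcut 0 with
      | none => loopB kur maxd yigin (kelimeler ++ [mevcut])
      | some (c, konum) =>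
        match hget : kur.get? (String.ofList [c]) with
        | none => loopB kur maxd yigin kelimeler
        | some uretimler =>
          loopB kur maxd
            (uretimler.reverse.foldl
              (fun st u => (yeniString mevcut konum u, derinlik + 1) :: st) yigin)
            kelimeler
termination_by st _ => (st.map (fun p => gBound kur (maxd + 1 - p.2).toNat p.1)).sum
decreasing_by
  · simp only [List.map_cons, List.sum_cons]
    have := one_le_gBound kur (maxd + 1 - derinlik).toNat mevcut
    omega
  · simp only [List.map_cons, List.sum_cons]
    have := one_le_gBound kur (maxd + 1 - derinlik).toNat mevcut
    omega
  · simp only [List.map_cons, List.sum_cons]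
    have := one_le_gBound kur (maxd + 1 - derinlik).toNat mevcut
    omega
  · rw [revPush, List.map_append, List.map_map, List.map_cons, List.sum_cons, List.sum_append]
    have e2 : maxd + 1 - (derinlik + 1) = maxd - derinlik := by ring
    simp only [Function.comp_def, e2]
    have e1 : (maxd + 1 - derinlik).toNat = (maxd - derinlik).toNat + 1 := by omega
    rw [e1]
    simp only [gBound, hNT, hget]
    omega

def kelimeleri_uret_alt (kurallar : List (String × List String)) (baslangic_sembolu : String)
    (max_derinlik : Int) : List String × List String × (List (String × Int)) :=
  sonucHazirla (loopB (PySem.Dict.ofList kurallar) max_derinlik [(baslangic_sembolu.toList, 0)] [])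

-- ===== PRECONDITION & SPEC =====
def Spec_kelimeleri_uret (kurallar : List (String × List String)) (baslangic_sembolu : String) (max_derinlik : Int) (out : List String × List String × (List (String × Int))) : Prop := out = kelimeleri_uret_alt kurallar baslangic_sembolu max_derinlik
instance (kurallar : List (String × List String)) (baslangic_sembolu : String) (max_derinlik : Int) (out : List String × List String × (List (String × Int))) : Decidable (Spec_kelimeleri_uret kurallar baslangic_sembolu max_derinlik out) := by unfold Spec_kelimeleri_uret; infer_instance

-- ===== CLAIM (what is proved, stated in full; the proofs are below) =====
def Claim_equal_kelimeleri_uret : Prop := ∀ (kurallar : List (String × List String)) (baslangic_sembolu : String) (max_derinlik : Int), Dom_kelimeleri_uret kurallar baslangic_sembolu max_derinlik → Spec_kelimeleri_uret kurallar baslangic_sembolu max_derinlik (kelimeleri_uret kurallar baslangic_sembolu max_derinlik)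

-- ===== LEMMAS AND PROOFS =====
theorem ilkNT_none_iff (m : List Char) (i : Nat) :
    ilkNonTerminal m i = none ↔ m.all terminalMi = true := by
  induction m generalizing i with
  | nil => simp [ilkNonTerminal]
  | cons c rest ih =>
    by_cases hc : terminalMi c <;> simp [ilkNonTerminal, hc, ih]

-- the worklist loop processes its stack exactly as A's recursion processes the items in order
theorem loopB_eq (kur : PySem.Dict String (List String)) (maxd : Int) :
    ∀ (st : List (List Char × Int)) (kel : List (List Char)),
      loopB kur maxd st kel =
        st.foldl (fun a p => genisletA kur maxd p.1 p.2 a) kel := by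
  intro st kel
  induction st, kel using loopB.induct kur maxd with
  | case1 kel => simp [loopB]
  | case2 mevcut derinlik yigin kel h ih =>
    rw [loopB, if_pos h, ih, List.foldl_cons, genisletA, if_pos h]
  | case3 mevcut derinlik yigin kel h hNT ih =>
    rw [loopB, if_neg h]
    split
    · rw [ih, List.foldl_cons, genisletA, if_neg h,
        if_pos ((ilkNT_none_iff mevcut 0).mp hNT)]
    · rename_i c konum heq
      rw [hNT] at heq; simp at heq
  | case4 mevcut derinlik yigin kel h c konum hNT hget ih =>
    rw [loopB, if_neg h]
    have hall : ¬ mevcut.all terminalMi = true := by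
      rw [← ilkNT_none_iff mevcut 0]; simp [hNT]
    split
    · rename_i heq; rw [hNT] at heq; simp at heq
    · rename_i c' konum' heq
      rw [hNT] at heq
      obtain ⟨rfl, rfl⟩ : c = c' ∧ konum = konum' := by simpa using heq
      split
      · rw [ih, List.foldl_cons, genisletA, if_neg h, if_neg hall]
        simp only [hNT, hget]
      · rename_i uretimler heq2
        rw [hget] at heq2; simp at heq2
  | case5 mevcut derinlik yigin kel h c konum hNT uretimler hget ih =>
    rw [loopB, if_neg h]
    have hall : ¬ mevcut.all terminalMi = true := by
      rw [← ilkNT_none_iff mevcut 0]; simp [hNT]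
    split
    · rename_i heq; rw [hNT] at heq; simp at heq
    · rename_i c' konum' heq
      rw [hNT] at heq
      obtain ⟨rfl, rfl⟩ : c = c' ∧ konum = konum' := by simpa using heq
      split
      · rename_i heq2; rw [hget] at heq2; simp at heq2
      · rename_i uretimler' heq2
        rw [hget] at heq2
        obtain rfl : uretimler = uretimler' := by simpa using heq2
        rw [ih, revPush, List.foldl_append, List.foldl_map, List.foldl_cons,
          genisletA, if_neg h, if_neg hall]
        simp only [hNT, hget]

-- ===== VERDICT (by name: the statement is the Claim_ definition above) =====
theorem kelimeleri_uret_spec : Claim_equal_kelimeleri_uret := by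
  intro kurallar s maxd _
  unfold Spec_kelimeleri_uret kelimeleri_uret kelimeleri_uret_alt
  rw [loopB_eq]
  simp
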